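-- pv_equiv track=rewrite | github.com/mishrakeshav/Competitive-Programming | binarysearch.io/924_common_reachable_node.py | solve
-- ===== SOURCE A (Python) =====
-- def solve(edges, a, b):
--
--     visiteda = dict()
--     visitedb = dict()
--     graph = dict()
--     for x,y in edges:
--         if x not in graph:
--             graph[x] = set()
--         if y not in graph:
--             graph[y] = set()
--         graph[y].add(x)
--     def dfs_a(node):
--         if node in visiteda:
--             return
--         visiteda[node] = 1
--         for i in graph[node]:
--             dfs_a(i)
--
--     def dfs_b(node):
--         if node in visiteda:
--             return True
--         if node in visitedb:
--             return
--         visitedb[node] = 1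
--         for i in graph[node]:
--             if dfs_b(i):
--                 return True
--         return False
--     dfs_a(a)
--     return dfs_b(b)
-- ===== SOURCE B (Python) =====
-- def solve(edges, a, b):
--     graph = {}
--     for x, y in edges:
--         graph.setdefault(x, [])
--         graph.setdefault(y, []).append(x)
--
--     def reach(start):
--         seen = set()
--         stack = [start]
--         while stack:
--             n = stack.pop()
--             if n not in seen:
--                 seen.add(n)
--                 stack.extend(graph[n])
--         return seen
--
--     ra = reach(a)
--     return any(n in ra for n in reach(b))
-- ===== Notes on version B (the rewrite author's own statement) =====
-- stated objective: alternative
-- what changed: Replaces the two recursive DFS closures (mark-set DFS from a, then an early-returning DFS from b that stops on marked nodes) with an iterative stack-based closure computed independently from each endpoint on the reversed graph, followed by a set-intersection test via any().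
import Mathlib
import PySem

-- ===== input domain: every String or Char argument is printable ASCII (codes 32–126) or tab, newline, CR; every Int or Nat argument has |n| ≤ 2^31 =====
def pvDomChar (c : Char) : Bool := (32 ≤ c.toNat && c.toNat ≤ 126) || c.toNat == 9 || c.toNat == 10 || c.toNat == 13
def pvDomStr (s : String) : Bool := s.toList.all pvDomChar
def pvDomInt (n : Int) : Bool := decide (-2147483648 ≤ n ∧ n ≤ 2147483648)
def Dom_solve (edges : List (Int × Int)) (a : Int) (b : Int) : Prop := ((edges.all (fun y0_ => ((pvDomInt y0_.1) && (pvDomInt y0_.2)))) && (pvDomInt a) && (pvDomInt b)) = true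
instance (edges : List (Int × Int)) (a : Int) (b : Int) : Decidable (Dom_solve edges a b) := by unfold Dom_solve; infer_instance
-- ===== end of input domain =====

-- B replaces A's two recursive DFS traversals by two independent iterative stack
-- closures on the same reversed graph plus an any()-intersection test (objective:
-- alternative; same asymptotic cost). Both raise KeyError (= none) on exactly the
-- same inputs: those where a or b does not occur in edges. Neither mutates its input.

-- ===== PORT A =====
-- graph built exactly as A: ensure keys x and y exist, then graph[y].add(x)
def buildGraph (edges : List (Int × Int)) : PySem.Dict Int (PySem.Set Int) :=
  edges.foldl (fun g p =>
    let g1 := if g.contains p.1 then g else g.insert p.1 PySem.Set.empty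
    let g2 := if g1.contains p.2 then g1 else g1.insert p.2 PySem.Set.empty
    g2.modify p.2 PySem.Set.empty (fun s => PySem.Set.add s p.1)) PySem.Dict.empty

-- dfs_a: the visiteda dict (all values are 1) is modeled by its key list `vis`;
-- fuel only makes the recursion total (none = fuel exhausted or KeyError = A raises).
-- `for i in graph[node]: dfs_a(i)` threading the visited set; `rec` is the recursive call
def dfsALoop (rec : Int → List Int → Option (List Int)) : List Int → List Int → Option (List Int)
  | [], vis => some vis
  | c :: cs, vis =>
    match rec c vis with
    | none => none
    | some vis' => dfsALoop rec cs vis'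

def dfsA (g : PySem.Dict Int (PySem.Set Int)) : Nat → Int → List Int → Option (List Int)
  | 0, _, _ => none
  | f+1, node, vis =>
    if node ∈ vis then some vis
    else
      match g.get? node with
      | none => none                        -- graph[node] → KeyError
      | some ch => dfsALoop (dfsA g f) ch (vis ++ [node])

-- dfs_b: returns (truthy?, visitedb); Python's True ↦ (true, _), None/False ↦ (false, _)
-- `for i in graph[node]: if dfs_b(i): return True` then `return False`
def dfsBLoop (rec : Int → List Int → Option (Bool × List Int)) : List Int → List Int → Option (Bool × List Int)
  | [], vis => some (false, vis)
  | c :: cs, vis =>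
    match rec c vis with
    | none => none
    | some (true, vis') => some (true, vis')
    | some (false, vis') => dfsBLoop rec cs vis'

def dfsB (g : PySem.Dict Int (PySem.Set Int)) (va : List Int) : Nat → Int → List Int → Option (Bool × List Int)
  | 0, _, _ => none
  | f+1, node, vis =>
    if node ∈ va then some (true, vis)
    else if node ∈ vis then some (false, vis)
    else
      match g.get? node with
      | none => none                        -- graph[node] → KeyError
      | some ch => dfsBLoop (dfsB g va f) ch (vis ++ [node])

def solve (edges : List (Int × Int)) (a : Int) (b : Int) : Option Bool :=
  let graph := buildGraph edges
  let fuel := graph.keys.length + 1          -- recursion-depth bound; fuel only totalizes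
  match dfsA graph fuel a [] with
  | none => none
  | some visa =>
    match dfsB graph visa fuel b [] with
    | none => none
    | some (r, _) => some r

-- ===== PORT B =====
-- graph.setdefault(x, []); graph.setdefault(y, []).append(x)
def buildGraphB (edges : List (Int × Int)) : PySem.Dict Int (List Int) :=
  edges.foldl (fun d p =>
    (d.setdefault p.1 []).modify p.2 [] (fun l => l ++ [p.1])) PySem.Dict.empty

-- the while loop; the stack's top is the list head, so `stack.extend(children)`
-- (popped last-pushed-first) pushes `children.reverse` in front; `graph[n]` raises
-- KeyError (= none) on a missing key; fuel only totalizes (proved never to run out).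
def reachLoop (g : PySem.Dict Int (List Int)) : Nat → List Int → PySem.Set Int → Option (PySem.Set Int)
  | 0, _, _ => none
  | _+1, [], seen => some seen
  | f+1, n :: rest, seen =>
    if n ∈ seen then reachLoop g f rest seen
    else
      match g.get? n with
      | none => none                        -- graph[n] → KeyError
      | some ch => reachLoop g f (ch.reverse ++ rest) (PySem.Set.add seen n)

def reach (edges : List (Int × Int)) (g : PySem.Dict Int (List Int)) (start : Int) : Option (PySem.Set Int) :=
  reachLoop g ((2 * edges.length + 1) * (edges.length + 1) + 2) [start] PySem.Set.empty

def solve_alt (edges : List (Int × Int)) (a : Int) (b : Int) : Option Bool :=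
  let graph := buildGraphB edges
  match reach edges graph a with
  | none => none
  | some ra =>
    match reach edges graph b with
    | none => none
    | some rb => some (rb.any (fun n => PySem.Set.contains ra n))

-- ===== PRECONDITION & SPEC =====
-- Pre_ excludes exactly the inputs on which A raises KeyError: a or b not occurring
-- in any edge (B raises KeyError on exactly the same inputs).
def Pre_solve (edges : List (Int × Int)) (a : Int) (b : Int) : Prop :=
  (∃ p ∈ edges, p.1 = a ∨ p.2 = a) ∧ (∃ p ∈ edges, p.1 = b ∨ p.2 = b)
instance (edges : List (Int × Int)) (a : Int) (b : Int) : Decidable (Pre_solve edges a b) := by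
  unfold Pre_solve; infer_instance

def pvWitness_solve : (List (Int × Int)) × Int × Int := ([(1, 2)], 1, 2)

def Spec_solve (edges : List (Int × Int)) (a : Int) (b : Int) (out : Option Bool) : Prop := out = solve_alt edges a b
instance (edges : List (Int × Int)) (a : Int) (b : Int) (out : Option Bool) : Decidable (Spec_solve edges a b out) := by unfold Spec_solve; infer_instance

-- ===== CLAIM (what is proved, stated in full; the proofs are below) =====
def Claim_equal_solve : Prop := ∀ (edges : List (Int × Int)) (a : Int) (b : Int), Dom_solve edges a b → Pre_solve edges a b → Spec_solve edges a b (solve edges a b)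

-- ===== LEMMAS AND PROOFS =====

-- the edge step relation on the reversed graph: c is a direct predecessor of n
def stepE (edges : List (Int × Int)) (n c : Int) : Prop := (c, n) ∈ edges
def appears (edges : List (Int × Int)) (n : Int) : Prop := ∃ p ∈ edges, p.1 = n ∨ p.2 = n

-- A's per-edge update of the graph dict
def gstep (g : PySem.Dict Int (PySem.Set Int)) (p : Int × Int) : PySem.Dict Int (PySem.Set Int) :=
  let g1 := if g.contains p.1 then g else g.insert p.1 PySem.Set.empty
  let g2 := if g1.contains p.2 then g1 else g1.insert p.2 PySem.Set.empty
  g2.modify p.2 PySem.Set.empty (fun s => PySem.Set.add s p.1)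

theorem buildGraph_eq (edges : List (Int × Int)) : buildGraph edges = edges.foldl gstep PySem.Dict.empty := rfl

theorem ensure_getD (d : PySem.Dict Int (PySem.Set Int)) (x n : Int) :
    (if d.contains x then d else d.insert x PySem.Set.empty).getD n PySem.Set.empty = d.getD n PySem.Set.empty := by
  split_ifs with h
  · rfl
  · rw [PySem.Dict.getD_insert]
    split_ifs with hn
    · subst hn; exact (PySem.Dict.getD_of_not_contains _ _ (by simpa using h)).symm
    · rfl

theorem gstep_getD_mem (d : PySem.Dict Int (PySem.Set Int)) (p : Int × Int) (n c : Int) :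
    c ∈ (gstep d p).getD n PySem.Set.empty ↔ c ∈ d.getD n PySem.Set.empty ∨ (c = p.1 ∧ n = p.2) := by
  unfold gstep
  rw [PySem.Dict.getD_modify]
  simp only [ensure_getD]
  split_ifs with hn
  · subst hn
    rw [PySem.Set.mem_add]
    tauto
  · tauto

theorem ensure_contains (d : PySem.Dict Int (PySem.Set Int)) (x m : Int) :
    (if d.contains x then d else d.insert x PySem.Set.empty).contains m = true
    ↔ m = x ∨ d.contains m = true := by
  split_ifs with h
  · constructor
    · exact fun hm => Or.inr hm
    · rintro (rfl | hm)
      · exact h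
      · exact hm
  · rw [PySem.Dict.contains_insert]
    simp

theorem gstep_mem_keys (d : PySem.Dict Int (PySem.Set Int)) (p : Int × Int) (n : Int) :
    n ∈ (gstep d p).keys ↔ n ∈ d.keys ∨ n = p.1 ∨ n = p.2 := by
  unfold gstep
  rw [← PySem.Dict.contains_iff_mem_keys, PySem.Dict.contains_modify]
  simp only [Bool.or_eq_true, beq_iff_eq]
  rw [ensure_contains (if d.contains p.1 then d else d.insert p.1 PySem.Set.empty) p.2 n,
    ensure_contains d p.1 n, PySem.Dict.contains_iff_mem_keys]
  tauto

theorem graph_getD_mem (edges : List (Int × Int)) (d : PySem.Dict Int (PySem.Set Int)) (n c : Int) :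
    c ∈ (edges.foldl gstep d).getD n PySem.Set.empty
    ↔ c ∈ d.getD n PySem.Set.empty ∨ (c, n) ∈ edges := by
  induction edges generalizing d with
  | nil => simp
  | cons p es ih =>
    rw [List.foldl_cons, ih, gstep_getD_mem]
    simp only [List.mem_cons]
    constructor
    · rintro ((h | ⟨rfl, rfl⟩) | h)
      · exact Or.inl h
      · exact Or.inr (Or.inl rfl)
      · exact Or.inr (Or.inr h)
    · rintro (h | rfl | h)
      · exact Or.inl (Or.inl h)
      · exact Or.inl (Or.inr ⟨rfl, rfl⟩)
      · exact Or.inr h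

theorem graph_keys_mem (edges : List (Int × Int)) (d : PySem.Dict Int (PySem.Set Int)) (n : Int) :
    n ∈ (edges.foldl gstep d).keys ↔ n ∈ d.keys ∨ appears edges n := by
  induction edges generalizing d with
  | nil => simp [appears]
  | cons p es ih =>
    rw [List.foldl_cons, ih, gstep_mem_keys]
    simp only [appears, List.mem_cons]
    constructor
    · rintro ((h | h | h) | ⟨q, hq, hh⟩)
      · exact Or.inl h
      · exact Or.inr ⟨p, Or.inl rfl, Or.inl h.symm⟩
      · exact Or.inr ⟨p, Or.inl rfl, Or.inr h.symm⟩
      · exact Or.inr ⟨q, Or.inr hq, hh⟩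
    · rintro (h | ⟨q, (rfl | hq), hh⟩)
      · exact Or.inl (Or.inl h)
      · rcases hh with h | h
        · exact Or.inl (Or.inr (Or.inl h.symm))
        · exact Or.inl (Or.inr (Or.inr h.symm))
      · exact Or.inr ⟨q, hq, hh⟩

-- B's per-edge update of the graph dict
def bstep (d : PySem.Dict Int (List Int)) (p : Int × Int) : PySem.Dict Int (List Int) :=
  (d.setdefault p.1 []).modify p.2 [] (fun l => l ++ [p.1])

theorem buildGraphB_eq (edges : List (Int × Int)) : buildGraphB edges = edges.foldl bstep PySem.Dict.empty := rfl

theorem setdefault_getD (d : PySem.Dict Int (List Int)) (x m : Int) :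
    (d.setdefault x []).getD m [] = d.getD m [] := by
  by_cases hm : m = x
  · subst hm
    exact PySem.Dict.getD_setdefault_self d m [] []
  · rw [PySem.Dict.getD_eq_get?_getD, PySem.Dict.get?_setdefault_of_ne d [] hm,
      ← PySem.Dict.getD_eq_get?_getD]

theorem bstep_getD (d : PySem.Dict Int (List Int)) (p : Int × Int) (m : Int) :
    (bstep d p).getD m [] = if m = p.2 then d.getD p.2 [] ++ [p.1] else d.getD m [] := by
  unfold bstep
  rw [PySem.Dict.getD_modify]
  simp only [setdefault_getD]

theorem graphB_getD_mem (edges : List (Int × Int)) (d : PySem.Dict Int (List Int)) (n c : Int) :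
    c ∈ (edges.foldl bstep d).getD n [] ↔ c ∈ d.getD n [] ∨ (c, n) ∈ edges := by
  induction edges generalizing d with
  | nil => simp
  | cons p es ih =>
    obtain ⟨x, y⟩ := p
    rw [List.foldl_cons, ih, bstep_getD]
    simp only [List.mem_cons, Prod.mk.injEq]
    split_ifs with hn
    · subst hn
      simp only [List.mem_append, List.mem_singleton]
      constructor
      · rintro ((h | rfl) | h)
        · exact Or.inl h
        · exact Or.inr (Or.inl ⟨rfl, trivial⟩)
        · exact Or.inr (Or.inr h)
      · rintro (h | ⟨rfl, -⟩ | h)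
        · exact Or.inl (Or.inl h)
        · exact Or.inl (Or.inr rfl)
        · exact Or.inr h
    · constructor
      · rintro (h | h)
        · exact Or.inl h
        · exact Or.inr (Or.inr h)
      · rintro (h | ⟨rfl, rfl⟩ | h)
        · exact Or.inl h
        · exact absurd rfl hn
        · exact Or.inr h

theorem bstep_mem_keys (d : PySem.Dict Int (List Int)) (p : Int × Int) (n : Int) :
    n ∈ (bstep d p).keys ↔ n ∈ d.keys ∨ n = p.1 ∨ n = p.2 := by
  unfold bstep
  rw [← PySem.Dict.contains_iff_mem_keys, PySem.Dict.contains_modify,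
    PySem.Dict.contains_setdefault]
  simp only [Bool.or_eq_true, beq_iff_eq]
  rw [PySem.Dict.contains_iff_mem_keys]
  tauto

theorem graphB_keys_mem (edges : List (Int × Int)) (d : PySem.Dict Int (List Int)) (n : Int) :
    n ∈ (edges.foldl bstep d).keys ↔ n ∈ d.keys ∨ appears edges n := by
  induction edges generalizing d with
  | nil => simp [appears]
  | cons p es ih =>
    rw [List.foldl_cons, ih, bstep_mem_keys]
    simp only [appears, List.mem_cons]
    constructor
    · rintro ((h | h | h) | ⟨q, hq, hh⟩)
      · exact Or.inl h
      · exact Or.inr ⟨p, Or.inl rfl, Or.inl h.symm⟩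
      · exact Or.inr ⟨p, Or.inl rfl, Or.inr h.symm⟩
      · exact Or.inr ⟨q, Or.inr hq, hh⟩
    · rintro (h | ⟨q, (rfl | hq), hh⟩)
      · exact Or.inl (Or.inl h)
      · rcases hh with h | h
        · exact Or.inl (Or.inr (Or.inl h.symm))
        · exact Or.inl (Or.inr (Or.inr h.symm))
      · exact Or.inr ⟨q, hq, hh⟩

theorem graphB_len (edges : List (Int × Int)) (d : PySem.Dict Int (List Int)) (n : Int) :
    ((edges.foldl bstep d).getD n []).length ≤ (d.getD n []).length + edges.length := by
  induction edges generalizing d with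
  | nil => simp
  | cons p es ih =>
    rw [List.foldl_cons]
    refine le_trans (ih (bstep d p)) ?_
    rw [bstep_getD]
    split_ifs with hn
    · subst hn
      simp only [List.length_append, List.length_cons, List.length_nil]
      omega
    · simp only [List.length_cons]
      omega

-- number of U-elements not yet seen
def uc (U seen : List Int) : Nat := (U.filter (fun x => !decide (x ∈ seen))).length

theorem filter_len_mono (l : List Int) (p q : Int → Bool) (h : ∀ x, q x = true → p x = true) :
    (l.filter q).length ≤ (l.filter p).length := by
  induction l with
  | nil => simp
  | cons u us ih =>
    simp only [List.filter_cons]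
    cases hq : q u with
    | true =>
      rw [h u hq]
      simpa using ih
    | false =>
      cases hp : p u with
      | true => simpa using Nat.le_succ_of_le ih
      | false => simpa using ih

theorem filter_len_strict (l : List Int) (p q : Int → Bool) (h : ∀ x, q x = true → p x = true)
    (n : Int) (hn : n ∈ l) (hq : q n = false) (hp : p n = true) :
    (l.filter q).length < (l.filter p).length := by
  induction l with
  | nil => simp at hn
  | cons u us ih =>
    simp only [List.filter_cons]
    by_cases hun : u = n
    · subst hun
      rw [hq, hp]
      simpa using Nat.lt_succ_of_le (filter_len_mono us p q h)
    · have hn2 : n ∈ us := by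
        rcases List.mem_cons.mp hn with h' | h'
        · exact absurd h'.symm hun
        · exact h'
      cases hqu : q u with
      | true =>
        rw [h u hqu]
        simpa using Nat.succ_lt_succ (ih hn2)
      | false =>
        cases hpu : p u with
        | true => simpa using Nat.lt_succ_of_lt (ih hn2)
        | false => simpa using ih hn2

theorem uc_mono (U seen seen' : List Int) (h : ∀ v ∈ seen, v ∈ seen') : uc U seen' ≤ uc U seen := by
  apply filter_len_mono
  intro x hx
  simp only [Bool.not_eq_eq_eq_not, Bool.not_true, decide_eq_false_iff_not] at hx ⊢
  exact fun hxs => hx (h x hxs)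

theorem uc_strict (U seen : List Int) (n : Int) (hU : n ∈ U) (hn : n ∉ seen) :
    uc U (seen ++ [n]) < uc U seen := by
  refine filter_len_strict _ _ _ ?_ n hU ?_ ?_
  · intro x hx
    simp only [Bool.not_eq_eq_eq_not, Bool.not_true, decide_eq_false_iff_not, List.mem_append] at hx ⊢
    exact fun hxs => hx (Or.inl hxs)
  · simp
  · simpa using hn

theorem uc_le (U seen : List Int) : uc U seen ≤ U.length := List.length_filter_le _ _

theorem get?_of_mem_keys {ν : Type} (d : PySem.Dict Int ν) (k : Int) (v0 : ν) (h : k ∈ d.keys) :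
    d.get? k = some (d.getD k v0) := by
  have hc : d.contains k = true := (PySem.Dict.contains_iff_mem_keys _ _).mpr h
  rw [PySem.Dict.contains_eq_isSome_get?] at hc
  obtain ⟨w, hw⟩ := Option.isSome_iff_exists.mp hc
  rw [hw, PySem.Dict.getD_eq_get?_getD, hw]
  rfl

-- ========== the A-side DFS computes the reachable set ==========

def stepG (g : PySem.Dict Int (PySem.Set Int)) (x c : Int) : Prop := c ∈ g.getD x PySem.Set.empty

theorem dfsALoop_mega (g : PySem.Dict Int (PySem.Set Int)) (f : Nat)
    (IH : ∀ node vis, node ∈ g.keys → (∀ v ∈ vis, v ∈ g.keys) → uc g.keys vis < f →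
      ∃ vis', dfsA g f node vis = some vis' ∧ (∀ v ∈ vis, v ∈ vis') ∧ node ∈ vis' ∧
        (∀ v ∈ vis', v ∈ g.keys) ∧
        (∀ v ∈ vis', v ∈ vis ∨ Relation.ReflTransGen (stepG g) node v) ∧
        (∀ v ∈ vis', v ∈ vis ∨ ∀ c ∈ g.getD v PySem.Set.empty, c ∈ vis')) :
    ∀ l vis, (∀ c ∈ l, c ∈ g.keys) → (∀ v ∈ vis, v ∈ g.keys) → uc g.keys vis < f →
      ∃ vis', dfsALoop (dfsA g f) l vis = some vis' ∧ (∀ v ∈ vis, v ∈ vis') ∧ (∀ c ∈ l, c ∈ vis') ∧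
        (∀ v ∈ vis', v ∈ g.keys) ∧
        (∀ v ∈ vis', v ∈ vis ∨ ∃ c ∈ l, Relation.ReflTransGen (stepG g) c v) ∧
        (∀ v ∈ vis', v ∈ vis ∨ ∀ c ∈ g.getD v PySem.Set.empty, c ∈ vis') := by
  intro l
  induction l with
  | nil =>
    intro vis _ hvis hf
    exact ⟨vis, rfl, fun v hv => hv, fun c hc => absurd hc (by simp), hvis,
      fun v hv => Or.inl hv, fun v hv => Or.inl hv⟩
  | cons c cs ihl =>
    intro vis hl hvis hf
    obtain ⟨vis1, he1, hsub1, hc1, hk1, hsnd1, hcl1⟩ :=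
      IH c vis (hl c (by simp)) hvis hf
    have hf1 : uc g.keys vis1 < f := lt_of_le_of_lt (uc_mono _ _ _ hsub1) hf
    obtain ⟨vis2, he2, hsub2, hcs2, hk2, hsnd2, hcl2⟩ :=
      ihl vis1 (fun x hx => hl x (by simp [hx])) hk1 hf1
    refine ⟨vis2, ?_, fun v hv => hsub2 v (hsub1 v hv), ?_, hk2, ?_, ?_⟩
    · simp only [dfsALoop, he1]; exact he2
    · intro x hx
      rcases List.mem_cons.mp hx with rfl | hx
      · exact hsub2 _ hc1
      · exact hcs2 _ hx
    · intro v hv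
      rcases hsnd2 v hv with hv1 | ⟨c', hc', hr⟩
      · rcases hsnd1 v hv1 with hv0 | hr
        · exact Or.inl hv0
        · exact Or.inr ⟨c, by simp, hr⟩
      · exact Or.inr ⟨c', by simp [hc'], hr⟩
    · intro v hv
      rcases hcl2 v hv with hv1 | hcl
      · rcases hcl1 v hv1 with hv0 | hcl
        · exact Or.inl hv0
        · exact Or.inr (fun x hx => hsub2 x (hcl x hx))
      · exact Or.inr hcl

theorem dfsA_mega (g : PySem.Dict Int (PySem.Set Int))
    (hcl : ∀ n ∈ g.keys, ∀ c ∈ g.getD n PySem.Set.empty, c ∈ g.keys) :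
    ∀ f node vis, node ∈ g.keys → (∀ v ∈ vis, v ∈ g.keys) → uc g.keys vis < f →
      ∃ vis', dfsA g f node vis = some vis' ∧ (∀ v ∈ vis, v ∈ vis') ∧ node ∈ vis' ∧
        (∀ v ∈ vis', v ∈ g.keys) ∧
        (∀ v ∈ vis', v ∈ vis ∨ Relation.ReflTransGen (stepG g) node v) ∧
        (∀ v ∈ vis', v ∈ vis ∨ ∀ c ∈ g.getD v PySem.Set.empty, c ∈ vis') := by
  intro f
  induction f with
  | zero => intro node vis _ _ hf; omega
  | succ f ih =>
    intro node vis hnode hvis hf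
    by_cases hmem : node ∈ vis
    · exact ⟨vis, by simp [dfsA, hmem], fun v hv => hv, hmem, hvis,
        fun v hv => Or.inl hv, fun v hv => Or.inl hv⟩
    · have hget := get?_of_mem_keys g node PySem.Set.empty hnode
      have hvis2 : ∀ v ∈ vis ++ [node], v ∈ g.keys := by
        intro v hv
        rcases List.mem_append.mp hv with h | h
        · exact hvis v h
        · simpa using (by simpa using h : v = node) ▸ hnode
      have hf2 : uc g.keys (vis ++ [node]) < f := by
        have := uc_strict g.keys vis node hnode hmem
        omega
      obtain ⟨vis', he, hsub, hchl, hk, hsnd, hclo⟩ :=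
        dfsALoop_mega g f ih (g.getD node PySem.Set.empty) (vis ++ [node])
          (hcl node hnode) hvis2 hf2
      refine ⟨vis', ?_, fun v hv => hsub v (by simp [hv]), hsub node (by simp), hk, ?_, ?_⟩
      · simp only [dfsA, if_neg hmem, hget]
        exact he
      · intro v hv
        rcases hsnd v hv with hv2 | ⟨c, hc, hr⟩
        · rcases List.mem_append.mp hv2 with h | h
          · exact Or.inl h
          · have : v = node := by simpa using h
            exact Or.inr (this ▸ Relation.ReflTransGen.refl)
        · exact Or.inr (Relation.ReflTransGen.head hc hr)
      · intro v hv
        rcases hclo v hv with hv2 | h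
        · rcases List.mem_append.mp hv2 with h | h
          · exact Or.inl h
          · have hvn : v = node := by simpa using h
            exact Or.inr (fun x hx => hchl x (hvn ▸ hx))
        · exact Or.inr h

theorem dfsA_char (g : PySem.Dict Int (PySem.Set Int))
    (hcl : ∀ n ∈ g.keys, ∀ c ∈ g.getD n PySem.Set.empty, c ∈ g.keys)
    (a : Int) (ha : a ∈ g.keys) :
    ∃ visa, dfsA g (g.keys.length + 1) a [] = some visa ∧
      (∀ v, v ∈ visa ↔ Relation.ReflTransGen (stepG g) a v) ∧
      (∀ v ∈ visa, v ∈ g.keys) := by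
  obtain ⟨visa, he, _, hmem, hkk, hsnd, hclo⟩ :=
    dfsA_mega g hcl (g.keys.length + 1) a [] ha (by simp)
      (lt_of_le_of_lt (uc_le _ _) (by omega))
  refine ⟨visa, he, fun v => ⟨?_, ?_⟩, hkk⟩
  · intro hv
    rcases hsnd v hv with h | h
    · simp at h
    · exact h
  · intro hr
    induction hr with
    | refl => exact hmem
    | tail _ hstep ih =>
      rcases hclo _ ih with h | h
      · simp at h
      · exact h _ hstep

-- ========== the A-side dfs_b decides intersection with va ==========

theorem dfsBLoop_mega (g : PySem.Dict Int (PySem.Set Int)) (va : List Int) (f : Nat)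
    (IH : ∀ node vis, node ∈ g.keys → (∀ v ∈ vis, v ∈ g.keys) → uc g.keys vis < f →
      ∃ r vis', dfsB g va f node vis = some (r, vis') ∧ (∀ v ∈ vis, v ∈ vis') ∧
        (∀ v ∈ vis', v ∈ g.keys) ∧
        (r = true → ∃ y, Relation.ReflTransGen (stepG g) node y ∧ y ∈ va) ∧
        (r = false → node ∈ vis' ∧ ∀ v ∈ vis', v ∈ vis ∨ (v ∉ va ∧ ∀ c ∈ g.getD v PySem.Set.empty, c ∈ vis'))) :
    ∀ l vis, (∀ c ∈ l, c ∈ g.keys) → (∀ v ∈ vis, v ∈ g.keys) → uc g.keys vis < f →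
      ∃ r vis', dfsBLoop (dfsB g va f) l vis = some (r, vis') ∧ (∀ v ∈ vis, v ∈ vis') ∧
        (∀ v ∈ vis', v ∈ g.keys) ∧
        (r = true → ∃ c ∈ l, ∃ y, Relation.ReflTransGen (stepG g) c y ∧ y ∈ va) ∧
        (r = false → (∀ c ∈ l, c ∈ vis') ∧ ∀ v ∈ vis', v ∈ vis ∨ (v ∉ va ∧ ∀ c ∈ g.getD v PySem.Set.empty, c ∈ vis')) := by
  intro l
  induction l with
  | nil =>
    intro vis _ hvis _
    exact ⟨false, vis, rfl, fun v hv => hv, hvis, fun h => absurd h Bool.false_ne_true,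
      fun _ => ⟨fun c hc => absurd hc (by simp), fun v hv => Or.inl hv⟩⟩
  | cons c cs ihl =>
    intro vis hl hvis hf
    obtain ⟨r1, vis1, he1, hsub1, hk1, ht1, hf1'⟩ := IH c vis (hl c (by simp)) hvis hf
    cases r1 with
    | true =>
      refine ⟨true, vis1, ?_, hsub1, hk1, ?_, by simp⟩
      · simp only [dfsBLoop, he1]
      · intro _
        obtain ⟨y, hy, hyv⟩ := ht1 rfl
        exact ⟨c, by simp, y, hy, hyv⟩
    | false =>
      obtain ⟨hc1, hinv1⟩ := hf1' rfl
      have hff : uc g.keys vis1 < f := lt_of_le_of_lt (uc_mono _ _ _ hsub1) hf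
      obtain ⟨r2, vis2, he2, hsub2, hk2, ht2, hf2'⟩ :=
        ihl vis1 (fun x hx => hl x (by simp [hx])) hk1 hff
      refine ⟨r2, vis2, ?_, fun v hv => hsub2 v (hsub1 v hv), hk2, ?_, ?_⟩
      · simp only [dfsBLoop, he1]; exact he2
      · intro hr
        obtain ⟨c', hc', hy⟩ := ht2 hr
        exact ⟨c', by simp [hc'], hy⟩
      · intro hr
        obtain ⟨hcs, hinv2⟩ := hf2' hr
        refine ⟨?_, ?_⟩
        · intro x hx
          rcases List.mem_cons.mp hx with rfl | hx
          · exact hsub2 _ hc1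
          · exact hcs _ hx
        · intro v hv
          rcases hinv2 v hv with hv1 | h
          · rcases hinv1 v hv1 with hv0 | ⟨hva, hclv⟩
            · exact Or.inl hv0
            · exact Or.inr ⟨hva, fun x hx => hsub2 x (hclv x hx)⟩
          · exact Or.inr h

theorem dfsB_mega (g : PySem.Dict Int (PySem.Set Int)) (va : List Int)
    (hcl : ∀ n ∈ g.keys, ∀ c ∈ g.getD n PySem.Set.empty, c ∈ g.keys) :
    ∀ f node vis, node ∈ g.keys → (∀ v ∈ vis, v ∈ g.keys) → uc g.keys vis < f →
      ∃ r vis', dfsB g va f node vis = some (r, vis') ∧ (∀ v ∈ vis, v ∈ vis') ∧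
        (∀ v ∈ vis', v ∈ g.keys) ∧
        (r = true → ∃ y, Relation.ReflTransGen (stepG g) node y ∧ y ∈ va) ∧
        (r = false → node ∈ vis' ∧ ∀ v ∈ vis', v ∈ vis ∨ (v ∉ va ∧ ∀ c ∈ g.getD v PySem.Set.empty, c ∈ vis')) := by
  intro f
  induction f with
  | zero => intro node vis _ _ hf; omega
  | succ f ih =>
    intro node vis hnode hvis hf
    by_cases hva : node ∈ va
    · exact ⟨true, vis, by simp [dfsB, hva], fun v hv => hv, hvis,
        fun _ => ⟨node, Relation.ReflTransGen.refl, hva⟩, by simp⟩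
    · by_cases hmem : node ∈ vis
      · refine ⟨false, vis, by simp [dfsB, hva, hmem], fun v hv => hv, hvis, by simp,
          fun _ => ⟨hmem, fun v hv => Or.inl hv⟩⟩
      · have hget := get?_of_mem_keys g node PySem.Set.empty hnode
        have hvis2 : ∀ v ∈ vis ++ [node], v ∈ g.keys := by
          intro v hv
          rcases List.mem_append.mp hv with h | h
          · exact hvis v h
          · exact (by simpa using h : v = node) ▸ hnode
        have hf2 : uc g.keys (vis ++ [node]) < f := by
          have := uc_strict g.keys vis node hnode hmem
          omega
        obtain ⟨r, vis', he, hsub, hk, ht, hfa⟩ :=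
          dfsBLoop_mega g va f ih (g.getD node PySem.Set.empty) (vis ++ [node])
            (hcl node hnode) hvis2 hf2
        refine ⟨r, vis', ?_, fun v hv => hsub v (by simp [hv]), hk, ?_, ?_⟩
        · simp only [dfsB, if_neg hva, if_neg hmem, hget]
          exact he
        · intro hr
          obtain ⟨c, hc, y, hy, hyv⟩ := ht hr
          exact ⟨y, Relation.ReflTransGen.head hc hy, hyv⟩
        · intro hr
          obtain ⟨hchl, hinv⟩ := hfa hr
          refine ⟨hsub node (by simp), ?_⟩
          intro v hv
          rcases hinv v hv with hv2 | h
          · rcases List.mem_append.mp hv2 with h | h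
            · exact Or.inl h
            · have hvn : v = node := by simpa using h
              subst hvn
              exact Or.inr ⟨hva, fun x hx => hchl x hx⟩
          · exact Or.inr h

theorem dfsB_char (g : PySem.Dict Int (PySem.Set Int)) (va : List Int)
    (hcl : ∀ n ∈ g.keys, ∀ c ∈ g.getD n PySem.Set.empty, c ∈ g.keys)
    (b : Int) (hb : b ∈ g.keys) :
    ∃ r vis', dfsB g va (g.keys.length + 1) b [] = some (r, vis') ∧
      (r = true ↔ ∃ y, Relation.ReflTransGen (stepG g) b y ∧ y ∈ va) := by
  obtain ⟨r, vis', he, _, _, ht, hfa⟩ :=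
    dfsB_mega g va hcl (g.keys.length + 1) b [] hb (by simp)
      (lt_of_le_of_lt (uc_le _ _) (by omega))
  refine ⟨r, vis', he, ⟨ht, ?_⟩⟩
  intro ⟨y, hy, hyv⟩
  cases r with
  | true => rfl
  | false =>
    obtain ⟨hbv, hinv⟩ := hfa rfl
    exfalso
    have hall : ∀ z, Relation.ReflTransGen (stepG g) b z → z ∈ vis' := by
      intro z hz
      induction hz with
      | refl => exact hbv
      | tail _ hstep ih2 =>
        rcases hinv _ ih2 with h | ⟨_, h⟩
        · simp at h
        · exact h _ hstep
    rcases hinv y (hall y hy) with h | ⟨h, _⟩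
    · simp at h
    · exact h hyv

-- ========== the B-side stack closure computes the reachable set ==========

theorem flatMap_pairs_len (edges : List (Int × Int)) :
    (edges.flatMap (fun p => [p.1, p.2])).length = 2 * edges.length := by
  induction edges with
  | nil => simp
  | cons p es ihe => simp [ihe]; omega

theorem reachLoopB_mega (edges : List (Int × Int)) (U : List Int)
    (hUcl : ∀ n c : Int, (c, n) ∈ edges → c ∈ U)
    (hKcl : ∀ n c : Int, (c, n) ∈ edges → c ∈ (buildGraphB edges).keys) :
    ∀ f stack seen, (∀ n ∈ stack, n ∈ U) → (∀ n ∈ stack, n ∈ (buildGraphB edges).keys) →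
      uc U seen * (edges.length + 1) + stack.length < f →
      ∃ out, reachLoop (buildGraphB edges) f stack seen = some out ∧
        (∀ v ∈ seen, v ∈ out) ∧ (∀ n ∈ stack, n ∈ out) ∧
        (∀ v ∈ out, v ∈ seen ∨ ∃ s ∈ stack, Relation.ReflTransGen (stepE edges) s v) ∧
        (∀ v ∈ out, v ∈ seen ∨ ∀ c, (c, v) ∈ edges → c ∈ out) := by
  intro f
  induction f with
  | zero => intro stack seen _ _ hf; omega
  | succ f ih =>
    intro stack seen hstU hstK hf
    match stack with
    | [] =>
      exact ⟨seen, rfl, fun v hv => hv, fun n hn => absurd hn (by simp),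
        fun v hv => Or.inl hv, fun v hv => Or.inl hv⟩
    | n :: rest =>
      by_cases hn : n ∈ seen
      · obtain ⟨out, he, h1, h2, h3, h4⟩ :=
          ih rest seen (fun x hx => hstU x (by simp [hx])) (fun x hx => hstK x (by simp [hx]))
            (by simp at hf; omega)
        have heq : reachLoop (buildGraphB edges) (f+1) (n :: rest) seen
            = reachLoop (buildGraphB edges) f rest seen := by
          simp [reachLoop, hn]
        refine ⟨out, heq.trans he, h1, ?_, ?_, h4⟩
        · intro x hx
          rcases List.mem_cons.mp hx with rfl | hx
          · exact h1 x hn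
          · exact h2 x hx
        · intro v hv
          rcases h3 v hv with h | ⟨s, hs, hr⟩
          · exact Or.inl h
          · exact Or.inr ⟨s, by simp [hs], hr⟩
      · have hget := get?_of_mem_keys (buildGraphB edges) n [] (hstK n (by simp))
        have hchmem : ∀ c : Int, c ∈ (buildGraphB edges).getD n [] ↔ (c, n) ∈ edges := by
          intro c
          rw [buildGraphB_eq, graphB_getD_mem]
          simp
        have hstU' : ∀ x ∈ ((buildGraphB edges).getD n []).reverse ++ rest, x ∈ U := by
          intro x hx
          rcases List.mem_append.mp hx with h | h
          · exact hUcl n x ((hchmem x).mp (List.mem_reverse.mp h))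
          · exact hstU x (by simp [h])
        have hstK' : ∀ x ∈ ((buildGraphB edges).getD n []).reverse ++ rest, x ∈ (buildGraphB edges).keys := by
          intro x hx
          rcases List.mem_append.mp hx with h | h
          · exact hKcl n x ((hchmem x).mp (List.mem_reverse.mp h))
          · exact hstK x (by simp [h])
        have hf2 : uc U (seen ++ [n]) * (edges.length + 1)
            + (((buildGraphB edges).getD n []).reverse ++ rest).length < f := by
          have hd : uc U (seen ++ [n]) + 1 ≤ uc U seen :=
            uc_strict U seen n (hstU n (by simp)) hn
          have hml : (uc U (seen ++ [n]) + 1) * (edges.length + 1) ≤ uc U seen * (edges.length + 1) :=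
            Nat.mul_le_mul_right _ hd
          have hlen : ((buildGraphB edges).getD n []).reverse.length ≤ edges.length := by
            rw [List.length_reverse]
            simpa using graphB_len edges PySem.Dict.empty n
          simp only [List.length_append, List.length_cons] at hf ⊢
          nlinarith
        obtain ⟨out, he, h1, h2, h3, h4⟩ :=
          ih (((buildGraphB edges).getD n []).reverse ++ rest) (seen ++ [n]) hstU' hstK' hf2
        have heq : reachLoop (buildGraphB edges) (f+1) (n :: rest) seen
            = reachLoop (buildGraphB edges) f (((buildGraphB edges).getD n []).reverse ++ rest) (seen ++ [n]) := by
          simp [reachLoop, hn, hget]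
        refine ⟨out, heq.trans he, fun v hv => h1 v (by simp [hv]), ?_, ?_, ?_⟩
        · intro x hx
          rcases List.mem_cons.mp hx with rfl | hx
          · exact h1 x (by simp)
          · exact h2 x (by simp [hx])
        · intro v hv
          rcases h3 v hv with h | ⟨s, hs, hr⟩
          · rcases List.mem_append.mp h with h | h
            · exact Or.inl h
            · have : v = n := by simpa using h
              exact Or.inr ⟨n, by simp, this ▸ Relation.ReflTransGen.refl⟩
          · rcases List.mem_append.mp hs with h | h
            · refine Or.inr ⟨n, by simp, Relation.ReflTransGen.head ?_ hr⟩
              exact (hchmem s).mp (List.mem_reverse.mp h)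
            · exact Or.inr ⟨s, by simp [h], hr⟩
        · intro v hv
          rcases h4 v hv with h | h
          · rcases List.mem_append.mp h with h | h
            · exact Or.inl h
            · have hvn : v = n := by simpa using h
              subst hvn
              refine Or.inr (fun c hc => h2 c ?_)
              exact List.mem_append.mpr (Or.inl (List.mem_reverse.mpr ((hchmem c).mpr hc)))
          · exact Or.inr h

theorem reachB_char (edges : List (Int × Int)) (s0 : Int)
    (hkeys : ∀ n : Int, n ∈ (buildGraphB edges).keys ↔ appears edges n)
    (hs0 : appears edges s0) :
    ∃ out, reach edges (buildGraphB edges) s0 = some out ∧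
      ∀ v, v ∈ out ↔ Relation.ReflTransGen (stepE edges) s0 v := by
  have hUcl : ∀ n c : Int, (c, n) ∈ edges → c ∈ (s0 :: edges.flatMap (fun p => [p.1, p.2])) := by
    intro n c hc
    simp only [List.mem_cons, List.mem_flatMap]
    exact Or.inr ⟨(c, n), hc, by simp⟩
  have hKcl : ∀ n c : Int, (c, n) ∈ edges → c ∈ (buildGraphB edges).keys := by
    intro n c hc
    exact (hkeys c).mpr ⟨(c, n), hc, Or.inl rfl⟩
  have hUlen : (s0 :: edges.flatMap (fun p => [p.1, p.2])).length = 2 * edges.length + 1 := by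
    simp only [List.length_cons, flatMap_pairs_len]
  have hf : uc (s0 :: edges.flatMap (fun p => [p.1, p.2])) [] * (edges.length + 1) + 1
      < (2 * edges.length + 1) * (edges.length + 1) + 2 := by
    have h1 : uc (s0 :: edges.flatMap (fun p => [p.1, p.2])) [] ≤ 2 * edges.length + 1 := by
      have := uc_le (s0 :: edges.flatMap (fun p => [p.1, p.2])) []
      omega
    have := Nat.mul_le_mul_right (edges.length + 1) h1
    omega
  obtain ⟨out, he, h1, h2, h3, h4⟩ := reachLoopB_mega edges _ hUcl hKcl
    ((2 * edges.length + 1) * (edges.length + 1) + 2) [s0] []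
    (by intro x hx; simp at hx; simp [hx])
    (by intro x hx; simp at hx; subst hx; exact (hkeys x).mpr hs0)
    (by simpa using hf)
  refine ⟨out, he, fun v => ⟨?_, ?_⟩⟩
  · intro hv
    rcases h3 v hv with h | ⟨s, hs, hr⟩
    · simp at h
    · have : s = s0 := by simpa using hs
      exact this ▸ hr
  · intro hr
    induction hr with
    | refl => exact h2 s0 (by simp)
    | tail _ hstep ih2 =>
      rcases h4 _ ih2 with h | h
      · simp at h
      · exact h _ hstep

-- relate the two step relations
theorem rt_iff {r s : Int → Int → Prop} (h : ∀ x y, r x y ↔ s x y) (a b : Int) :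
    Relation.ReflTransGen r a b ↔ Relation.ReflTransGen s a b :=
  ⟨Relation.ReflTransGen.mono (fun x y hx => (h x y).mp hx),
   Relation.ReflTransGen.mono (fun x y hx => (h x y).mpr hx)⟩

-- ===== VERDICT (by name: the statement is the Claim_ definition above) =====
theorem solve_spec : Claim_equal_solve := by
  intro edges a b _ hpre
  obtain ⟨ha, hb⟩ := hpre
  unfold Spec_solve
  have hkeysA : ∀ n, n ∈ (buildGraph edges).keys ↔ appears edges n := by
    intro n
    rw [buildGraph_eq, graph_keys_mem]
    simp [appears]
  have hkeysB : ∀ n, n ∈ (buildGraphB edges).keys ↔ appears edges n := by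
    intro n
    rw [buildGraphB_eq, graphB_keys_mem]
    simp [appears]
  have hgetD : ∀ n c : Int, c ∈ (buildGraph edges).getD n PySem.Set.empty ↔ (c, n) ∈ edges := by
    intro n c
    rw [buildGraph_eq, graph_getD_mem]
    simp
  have hcl : ∀ n ∈ (buildGraph edges).keys, ∀ c ∈ (buildGraph edges).getD n PySem.Set.empty,
      c ∈ (buildGraph edges).keys := by
    intro n _ c hc
    rw [hkeysA]
    exact ⟨(c, n), (hgetD n c).mp hc, Or.inl rfl⟩
  have hstep : ∀ x y : Int, stepG (buildGraph edges) x y ↔ stepE edges x y := by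
    intro x y
    exact (hgetD x y).trans Iff.rfl
  obtain ⟨visa, hea, hva, hvk⟩ := dfsA_char (buildGraph edges) hcl a ((hkeysA a).mpr ha)
  obtain ⟨ra, hra, hrac⟩ := reachB_char edges a hkeysB ha
  obtain ⟨r, visb, heb, hrb⟩ := dfsB_char (buildGraph edges) visa hcl b ((hkeysA b).mpr hb)
  obtain ⟨rb, hrbm, hrbc⟩ := reachB_char edges b hkeysB hb
  have hsolve : solve edges a b = some r := by
    unfold solve
    simp only [hea, heb]
  have halt : solve_alt edges a b = some (rb.any (fun n => PySem.Set.contains ra n)) := by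
    unfold solve_alt
    simp only [hra, hrbm]
  rw [hsolve, halt]
  congr 1
  have hiff : r = true ↔ (rb.any (fun n => PySem.Set.contains ra n)) = true := by
    rw [hrb, List.any_eq_true]
    constructor
    · rintro ⟨y, hy, hyv⟩
      refine ⟨y, ?_, ?_⟩
      · exact (hrbc y).mpr ((rt_iff hstep b y).mp hy)
      · rw [PySem.Set.contains_iff, hrac]
        exact (rt_iff hstep a y).mp ((hva y).mp hyv)
    · rintro ⟨y, hy, hyv⟩
      refine ⟨y, (rt_iff hstep b y).mpr ((hrbc y).mp hy), ?_⟩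
      rw [hva y, rt_iff hstep]
      rw [PySem.Set.contains_iff, hrac] at hyv
      exact hyv
  rcases Bool.eq_false_or_eq_true r with h | h <;>
    rcases Bool.eq_false_or_eq_true ((rb.any (fun n => PySem.Set.contains ra n))) with h2 | h2 <;>
    simp_all
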